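-- pv_equiv track=rewrite | github.com/DaiJitao/algorithm | solution/solution300.py | demo300
-- ===== SOURCE A (Python) =====
-- def demo300(nums):
--     n = len(nums)
--     if n == 0:
--         return None
--     elif n == 1:
--         return 1
--
--     dp = [0] * (n + 1)
--     dp[0] = 1
--     for j in range(0, n - 1):
--         for i in range(j + 1, n):
--             if nums[i] > nums[i - 1]:
--                 dp[i] = dp[i - 1] + 1
--             else:
--                 dp[i] = dp[i - 1]
--
--     return dp[n - 1]
-- ===== SOURCE B (Python) =====
-- def demo300(nums):
--     if not nums:
--         return None
--     return 1 + sum(1 for a, b in zip(nums, nums[1:]) if b > a)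
-- ===== Notes on version B (the rewrite author's own statement) =====
-- stated objective: faster
-- what changed: A fills a dp table with an O(n^2) double loop whose outer iterations after the first just recompute the same values; B makes a single pass over consecutive pairs, adding 1 per ascent, starting from 1.
import Mathlib
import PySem

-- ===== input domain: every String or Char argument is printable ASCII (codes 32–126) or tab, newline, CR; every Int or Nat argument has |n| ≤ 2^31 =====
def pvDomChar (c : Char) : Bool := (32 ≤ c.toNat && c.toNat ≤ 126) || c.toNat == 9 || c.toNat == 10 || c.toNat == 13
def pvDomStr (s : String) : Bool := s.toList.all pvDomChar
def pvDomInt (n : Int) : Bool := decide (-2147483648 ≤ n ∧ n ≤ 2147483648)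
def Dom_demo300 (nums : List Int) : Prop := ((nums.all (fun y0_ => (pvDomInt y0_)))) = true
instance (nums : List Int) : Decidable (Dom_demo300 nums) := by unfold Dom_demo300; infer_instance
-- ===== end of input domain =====

-- B replaces A's redundant double loop by a single pass over consecutive pairs (objective: faster).

-- ===== PORT A =====
-- the body of A's inner loop: dp[i] = dp[i-1] + 1 if nums[i] > nums[i-1] else dp[i-1]
def demo300_innerStep (nums : List Int) (dp : List Int) (i : Int) : List Int :=
  if PySem.List.pyGetD nums i 0 > PySem.List.pyGetD nums (i - 1) 0 then
    PySem.List.pySetD dp i (PySem.List.pyGetD dp (i - 1) 0 + 1)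
  else
    PySem.List.pySetD dp i (PySem.List.pyGetD dp (i - 1) 0)

def demo300 (nums : List Int) : Option Int :=
  let n : Nat := nums.length
  if n = 0 then none
  else if n = 1 then some 1
  else
    let dp : List Int := List.replicate (n + 1) 0
    let dp := PySem.List.pySetD dp 0 1
    let dp := (PySem.List.pyRange 0 ((n : Int) - 1) 1).foldl
      (fun dp j => (PySem.List.pyRange (j + 1) (n : Int) 1).foldl (demo300_innerStep nums) dp) dp
    some (PySem.List.pyGetD dp ((n : Int) - 1) 0)

-- ===== PORT B =====
def demo300_alt (nums : List Int) : Option Int :=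
  match nums with
  | [] => none
  | _ :: _ =>
    some (1 + ((nums.zip (PySem.List.slice nums (some 1) none)).foldl
      (fun acc p => if p.2 > p.1 then acc + 1 else acc) 0))

-- ===== PRECONDITION & SPEC =====
def Spec_demo300 (nums : List Int) (out : Option Int) : Prop := out = demo300_alt nums
instance (nums : List Int) (out : Option Int) : Decidable (Spec_demo300 nums out) := by unfold Spec_demo300; infer_instance

-- ===== CLAIM (what is proved, stated in full; the proofs are below) =====
def Claim_equal_demo300 : Prop := ∀ (nums : List Int), Dom_demo300 nums → Spec_demo300 nums (demo300 nums)

-- ===== LEMMAS AND PROOFS =====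

-- the value A's dp settles at in cell k: 1 plus the number of ascents among the first k consecutive pairs
def pvVal (nums : List Int) : Nat → Int
  | 0 => 1
  | k + 1 => if nums.getD (k + 1) 0 > nums.getD k 0 then pvVal nums k + 1 else pvVal nums k

-- one inner pass of A starting at index a writes pvVal into every cell a ≤ k < n, given it holds below a
lemma demo300_inner (nums : List Int) : ∀ (d a : Nat) (dp : List Int),
    nums.length - a ≤ d → 1 ≤ a → dp.length = nums.length + 1 →
    (∀ k : Nat, k < a → k < nums.length → PySem.List.pyGetD dp (k : Int) 0 = pvVal nums k) →
    ((PySem.List.pyRange (a : Int) (nums.length : Int) 1).foldl (demo300_innerStep nums) dp).length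
        = nums.length + 1 ∧
    (∀ k : Nat, k < nums.length →
      PySem.List.pyGetD ((PySem.List.pyRange (a : Int) (nums.length : Int) 1).foldl
        (demo300_innerStep nums) dp) (k : Int) 0 = pvVal nums k) := by
  intro d
  induction d with
  | zero =>
    intro a dp hd ha hlen hbelow
    have hna : nums.length ≤ a := by omega
    rw [PySem.List.pyRange_one_eq_nil (by exact_mod_cast hna)]
    exact ⟨hlen, fun k hk => hbelow k (by omega) hk⟩
  | succ d ih =>
    intro a dp hd ha hlen hbelow
    by_cases hna : nums.length ≤ a
    · rw [PySem.List.pyRange_one_eq_nil (by exact_mod_cast hna)]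
      exact ⟨hlen, fun k hk => hbelow k (by omega) hk⟩
    · have hna' : a < nums.length := by omega
      rw [PySem.List.pyRange_one_cons (by exact_mod_cast hna'), List.foldl_cons]
      obtain ⟨a', rfl⟩ : ∃ a', a = a' + 1 := ⟨a - 1, by omega⟩
      have hstep : demo300_innerStep nums dp ((a' + 1 : Nat) : Int)
          = dp.set (a' + 1) (pvVal nums (a' + 1)) := by
        unfold demo300_innerStep
        have hidx : ((a' + 1 : Nat) : Int) - 1 = ((a' : Nat) : Int) := by push_cast; ring
        rw [hidx]
        have hget : PySem.List.pyGetD dp ((a' : Nat) : Int) 0 = pvVal nums a' :=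
          hbelow a' (by omega) (by omega)
        rw [hget]
        simp only [PySem.List.pyGetD_natCast, PySem.List.pySetD_natCast]
        have hv : pvVal nums (a' + 1)
            = if nums.getD (a' + 1) 0 > nums.getD a' 0 then pvVal nums a' + 1 else pvVal nums a' := rfl
        rw [hv, apply_ite (dp.set (a' + 1))]
      rw [hstep]
      have hc : ((a' + 1 : Nat) : Int) + 1 = ((a' + 1 + 1 : Nat) : Int) := by push_cast; ring
      rw [hc]
      apply ih (a' + 1 + 1) _ (by omega) (by omega) (by simp [hlen])
      intro k hk hkn
      by_cases hke : k = a' + 1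
      · subst hke
        have hlt : a' + 1 < dp.length := by omega
        rw [PySem.List.pyGetD_natCast]
        simp [List.getD, hlt]
      · have hk' : k < a' + 1 := by omega
        have heq : PySem.List.pyGetD (dp.set (a' + 1) (pvVal nums (a' + 1))) (k : Int) 0
            = PySem.List.pyGetD dp (k : Int) 0 := by
          rw [PySem.List.pyGetD_natCast, PySem.List.pyGetD_natCast]
          simp [List.getD, Ne.symm hke]
        rw [heq]
        exact hbelow k hk' hkn

-- A's outer loop preserves the "dp holds pvVal everywhere below n" invariant
lemma demo300_outer (nums : List Int) : ∀ (l : List Int), (∀ j ∈ l, 0 ≤ j) → ∀ dp : List Int,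
    dp.length = nums.length + 1 →
    (∀ k : Nat, k < nums.length → PySem.List.pyGetD dp (k : Int) 0 = pvVal nums k) →
    ((l.foldl (fun dp j => (PySem.List.pyRange (j + 1) (nums.length : Int) 1).foldl
        (demo300_innerStep nums) dp) dp).length = nums.length + 1 ∧
     ∀ k : Nat, k < nums.length →
       PySem.List.pyGetD (l.foldl (fun dp j => (PySem.List.pyRange (j + 1) (nums.length : Int) 1).foldl
        (demo300_innerStep nums) dp) dp) (k : Int) 0 = pvVal nums k) := by
  intro l
  induction l with
  | nil => intro _ dp hlen hval; exact ⟨hlen, hval⟩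
  | cons j l ih =>
    intro hmem dp hlen hval
    have hj : 0 ≤ j := hmem j (by simp)
    rw [List.foldl_cons]
    have hc : j + 1 = (((j + 1).toNat : Nat) : Int) := by omega
    have h1 := demo300_inner nums (nums.length) ((j + 1).toNat) dp (by omega) (by omega) hlen
      (fun k _ hkn => hval k hkn)
    rw [hc]
    exact ih (fun x hx => hmem x (by simp [hx])) _ h1.1 h1.2

-- B's single pass over the first k consecutive pairs computes pvVal k
lemma demo300_zip (nums : List Int) : ∀ (k : Nat), k < nums.length →
    1 + (((nums.zip (nums.drop 1)).take k).foldl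
      (fun acc p => if p.2 > p.1 then acc + 1 else acc) 0) = pvVal nums k := by
  intro k
  induction k with
  | zero => intro _; simp [pvVal]
  | succ k ih =>
    intro hk
    have hk' : k < nums.length := Nat.lt_of_succ_lt hk
    have hzlen : (nums.zip (nums.drop 1)).length = nums.length - 1 := by
      simp [List.length_zip]
    have hkz : k < (nums.zip (nums.drop 1)).length := by omega
    rw [List.take_add_one, List.getElem?_eq_getElem hkz]
    simp only [List.foldl_append, Option.toList_some, List.foldl_cons, List.foldl_nil]
    have hkd : k < (nums.drop 1).length := by simp; omega
    have h1 : (nums.zip (nums.drop 1))[k] = (nums[k]'hk', (nums.drop 1)[k]'hkd) := List.getElem_zip ..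
    have h2 : (nums.drop 1)[k]'hkd = nums[1 + k]'(by omega) := List.getElem_drop ..
    have h3 : nums.getD (k+1) 0 = nums[k+1] := List.getD_eq_getElem _ _ hk
    have h4 : nums.getD k 0 = nums[k] := List.getD_eq_getElem _ _ hk'
    rw [h1]
    simp only [h2]
    unfold pvVal
    rw [h3, h4]
    have hik : nums[1+k]'(by omega) = nums[k+1]'hk := by congr 1; omega
    rw [hik]
    split
    · rw [← ih hk']; ring
    · exact ih hk'

-- B's result, for nonempty input, is pvVal at the last index
lemma demo300_alt_eq (nums : List Int) (h1 : 1 ≤ nums.length) :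
    demo300_alt nums = some (pvVal nums (nums.length - 1)) := by
  rcases nums with _ | ⟨x, t⟩
  · simp at h1
  · show some (1 + _) = _
    rw [PySem.List.slice_from_one]
    rw [show (x :: t).tail = (x :: t).drop 1 from rfl]
    have hzz := demo300_zip (x :: t) ((x :: t).length - 1) (by simp)
    rw [List.take_of_length_le (by simp [List.length_zip])] at hzz
    rw [hzz]

lemma demo300_main (nums : List Int) (h2 : 2 ≤ nums.length) : demo300 nums = demo300_alt nums := by
  have hn0 : nums.length ≠ 0 := by omega
  have hn1 : nums.length ≠ 1 := by omega
  unfold demo300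
  simp only [hn0, hn1, if_false]
  rw [show ((nums.length : Int) - 1) = ((nums.length - 1 : Nat) : Int) by omega]
  rw [PySem.List.pyRange_one_cons (show (0:Int) < ((nums.length - 1 : Nat) : Int) by
    have : 1 ≤ nums.length - 1 := by omega
    omega), List.foldl_cons]
  rw [show ((0:Int) + 1) = ((1 : Nat) : Int) by norm_num]
  have hdp0 : PySem.List.pySetD (List.replicate (nums.length + 1) (0 : Int)) 0 1
      = (List.replicate (nums.length + 1) (0 : Int)).set 0 1 := by
    rw [show (0 : Int) = ((0 : Nat) : Int) from rfl, PySem.List.pySetD_natCast]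
  rw [hdp0]
  have h1 := demo300_inner nums nums.length 1 ((List.replicate (nums.length + 1) (0 : Int)).set 0 1)
    (by omega) (by omega) (by simp)
    (by
      intro k hk hkn
      interval_cases k
      rw [show ((0 : Nat) : Int) = (0 : Int) from rfl]
      simp [PySem.List.pyGetD_zero, List.getD, pvVal])
  have houter := demo300_outer nums
    (PySem.List.pyRange ((1 : Nat) : Int) ((nums.length - 1 : Nat) : Int) 1)
    (by intro j hj; rw [PySem.List.mem_pyRange_one] at hj; omega)
    _ h1.1 h1.2
  rw [houter.2 (nums.length - 1) (by omega)]
  rw [demo300_alt_eq nums (by omega)]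

-- ===== VERDICT (by name: the statement is the Claim_ definition above) =====
theorem demo300_spec : Claim_equal_demo300 := by
  unfold Claim_equal_demo300
  intro nums _
  unfold Spec_demo300
  match nums with
  | [] => rfl
  | [x] => simp [demo300, demo300_alt, PySem.List.slice_from_one]
  | x :: y :: t => exact demo300_main _ (by simp)
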